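-- pv_equiv track=rewrite | github.com/bappa0125/zyon_ticketing | backend/app/services/narrative_strategy_llm_router.py | _resolve_overlap
-- ===== SOURCE A (Python) =====
-- def _dedup_keep_order(xs: list[str]) -> list[str]:
--     seen: set[str] = set()
--     out: list[str] = []
--     for x in xs:
--         s = str(x or "").strip()
--         if not s or s in seen:
--             continue
--         out.append(s)
--         seen.add(s)
--     return out
--
-- def _get_all_parents(tag: str, parent_map: dict[str, list[str]]) -> set[str]:
--     """
--     Return transitive closure of parents for tag. Assumes parent_map already validated (acyclic, known parents).
--     """
--     start = (tag or "").strip()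
--     if not start:
--         return set()
--     out: set[str] = set()
--     stack = list(parent_map.get(start, []))
--     while stack:
--         p = stack.pop()
--         if p in out:
--             continue
--         out.add(p)
--         stack.extend(parent_map.get(p, []))
--     return out
--
-- def _resolve_overlap(tags: list[str], parent_map: dict[str, list[str]]) -> list[str]:
--     """
--     Remove any selected tag that is a (transitive) parent of another selected tag.
--     Keeps the most specific tags only.
--     """
--     picked = _dedup_keep_order(tags)
--     parent_sets: dict[str, set[str]] = {t: _get_all_parents(t, parent_map) for t in picked}
--     to_drop: set[str] = set()
--     for a in picked:
--         for b in picked: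
--             if a == b:
--                 continue
--             # drop a if it is a parent of b
--             if a in parent_sets.get(b, set()):
--                 to_drop.add(a)
--     return [t for t in picked if t not in to_drop]
-- ===== SOURCE B (Python) =====
-- def _resolve_overlap(tags: list[str], parent_map: dict[str, list[str]]) -> list[str]:
--     # Reverse strategy: instead of collecting each tag's ancestor set and comparing
--     # pairs, build the child-adjacency (reversed graph) once and keep a tag iff a
--     # goal-directed search from it finds no OTHER selected tag among its descendants.
--     picked = list(dict.fromkeys(s for x in tags if (s := str(x or "").strip())))
--     children: dict[str, list[str]] = {}
--     for child, parents in parent_map.items():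
--         for p in parents:
--             children.setdefault(p, []).append(child)
--     picked_set = set(picked)
--
--     def _is_ancestor_of_other(a: str) -> bool:
--         stack = list(children.get(a, []))
--         seen: set[str] = set()
--         while stack:
--             x = stack.pop()
--             if x in picked_set and x != a:
--                 return True
--             if x not in seen:
--                 seen.add(x)
--                 stack.extend(children.get(x, []))
--         return False
--
--     return [t for t in picked if not _is_ancestor_of_other(t)]
-- ===== Notes on version B (the rewrite author's own statement) =====
-- stated objective: faster
-- what changed: B searches in the opposite direction: it builds the reversed (child-adjacency) graph once and keeps a tag iff a goal-directed DFS from it meets no other selected tag among its descendants (early exit), instead of A's per-tag ancestor-closure sets followed by a quadratic all-pairs membership scan.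
import Mathlib
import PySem

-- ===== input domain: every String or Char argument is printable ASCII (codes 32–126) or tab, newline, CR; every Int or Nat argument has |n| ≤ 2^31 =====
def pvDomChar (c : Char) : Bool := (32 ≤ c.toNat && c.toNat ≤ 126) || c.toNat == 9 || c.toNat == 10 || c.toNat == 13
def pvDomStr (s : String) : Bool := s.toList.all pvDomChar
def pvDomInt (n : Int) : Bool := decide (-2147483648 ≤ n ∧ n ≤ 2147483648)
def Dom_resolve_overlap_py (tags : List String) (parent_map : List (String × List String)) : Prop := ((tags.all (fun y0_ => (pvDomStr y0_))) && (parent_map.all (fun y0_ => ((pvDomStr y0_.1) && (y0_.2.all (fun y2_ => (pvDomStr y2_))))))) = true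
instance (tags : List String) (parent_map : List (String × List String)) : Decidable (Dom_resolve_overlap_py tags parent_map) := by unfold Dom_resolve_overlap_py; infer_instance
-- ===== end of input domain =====

-- B searches the OTHER direction: it reverses parent_map into a child-adjacency map once and
-- keeps a tag iff a goal-directed DFS from it meets no other selected tag among its
-- descendants, instead of A's per-tag ancestor closures plus all-pairs membership scan.
-- (Same return value; neither argument is mutated.)

-- ===== PORT A =====

-- all strings occurring in the values of an association list; used only by the termination
-- measures of the two while-loops below
def pvAllVals (pm : List (String × List String)) : List String := pm.flatMap (fun kv => kv.2)

lemma pv_getD_mem (pm : List (String × List String)) (k x : String)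
    (hx : x ∈ PySem.Dict.getD ⟨pm⟩ k []) : x ∈ pvAllVals pm := by
  induction pm with
  | nil => simp [PySem.Dict.getD, PySem.Dict.get?] at hx
  | cons hd tl ih =>
    simp only [PySem.Dict.getD, PySem.Dict.get?, List.find?] at hx ih
    by_cases h : hd.1 == k
    · simp [h, pvAllVals] at hx ⊢
      exact Or.inl hx
    · simp only [h] at hx
      have := ih hx
      simp [pvAllVals] at this ⊢
      exact Or.inr this

lemma pv_getD_len (pm : List (String × List String)) (k : String) :
    (PySem.Dict.getD ⟨pm⟩ k []).length ≤ (pvAllVals pm).length := by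
  induction pm with
  | nil => simp [PySem.Dict.getD, PySem.Dict.get?]
  | cons hd tl ih =>
    simp only [PySem.Dict.getD, PySem.Dict.get?, List.find?] at ih ⊢
    by_cases h : hd.1 == k
    · simp [h, pvAllVals, List.length_append]
    · simp only [h] at ih ⊢
      simp [pvAllVals, List.length_append] at ih ⊢
      omega

lemma pv_filter_decrease (univ : List String) (out : PySem.Set String) (p : String)
    (hmem : p ∈ univ) (hp : p ∉ out) :
    ((univ.dedup.filter (fun x => decide (x ∉ PySem.Set.add out p))).length <
      (univ.dedup.filter (fun x => decide (x ∉ out))).length) := by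
  have hrw : univ.dedup.filter (fun x => decide (x ∉ PySem.Set.add out p)) =
      (univ.dedup.filter (fun x => decide (x ∉ out))).filter (fun x => decide (x ≠ p)) := by
    rw [List.filter_filter]
    apply List.filter_congr
    intro x _
    simp only [decide_not, PySem.Set.mem_add]
    by_cases h1 : x ∈ out <;> by_cases h2 : x = p <;> simp [h1, h2]
  rw [hrw]
  apply List.length_filter_lt_length_iff_exists.mpr
  exact ⟨p, by simp [List.mem_filter, List.mem_dedup, hmem, hp]⟩

lemma pv_measure_dec (K' K L g r : Nat) (h1 : K' < K) (h2 : g ≤ L) :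
    K' * (L + 1) + (g + r) < K * (L + 1) + (r + 1) := by nlinarith

-- Source A's _get_all_parents while-loop:
--   while stack: p = stack.pop(); if p not in out: out.add(p); stack.extend(parent_map.get(p, []))
-- the Lean list `stack` holds the Python stack TOP FIRST (pop = head, extend = reverse ++);
-- the proof argument only justifies termination and does not alter the computation
def pvClosureLoop (pm : List (String × List String)) (out : PySem.Set String) (stack : List String)
    (hstk : ∀ x ∈ stack, x ∈ pvAllVals pm) : PySem.Set String :=
  match stack with
  | [] => out
  | p :: rest =>
    if hp : p ∈ out then
      pvClosureLoop pm out rest (fun x hx => hstk x (List.mem_cons_of_mem p hx))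
    else
      pvClosureLoop pm (PySem.Set.add out p)
        ((PySem.Dict.getD ⟨pm⟩ p []).reverse ++ rest)
        (fun x hx => by
          rcases List.mem_append.mp hx with h | h
          · exact pv_getD_mem pm p x (List.mem_reverse.mp h)
          · exact hstk x (List.mem_cons_of_mem p h))
  termination_by ((pvAllVals pm).dedup.filter (fun x => decide (x ∉ out))).length * ((pvAllVals pm).length + 1) + stack.length
  decreasing_by
  · simp only [List.length_cons]
    omega
  · simp only [List.length_append, List.length_reverse, List.length_cons]
    exact pv_measure_dec _ _ _ _ _
      (pv_filter_decrease (pvAllVals pm) out p (hstk p List.mem_cons_self) hp)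
      (pv_getD_len pm p)

-- closure of the direct parents of a (already stripped, nonempty) tag
def pvParents (b : String) (pm : List (String × List String)) : PySem.Set String :=
  pvClosureLoop pm PySem.Set.empty (PySem.Dict.getD ⟨pm⟩ b []).reverse
    (fun x hx => pv_getD_mem pm b x (List.mem_reverse.mp hx))

-- Source A _get_all_parents
def pvGetAllParents (tag : String) (pm : List (String × List String)) : PySem.Set String :=
  let start := PySem.Str.strip tag
  if start = "" then PySem.Set.empty
  else pvParents start pm

-- Source A _dedup_keep_order, loop body (for str inputs `str(x or "")` is x itself);
-- state = (seen, out)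
def pvDedupStep (st : PySem.Set String × List String) (x : String) :
    PySem.Set String × List String :=
  let s := PySem.Str.strip x
  if s = "" ∨ s ∈ st.1 then st
  else (PySem.Set.add st.1 s, st.2 ++ [s])

def pvDedupKeepOrder (xs : List String) : List String :=
  (xs.foldl pvDedupStep (PySem.Set.empty, [])).2

def resolve_overlap_py (tags : List String) (parent_map : List (String × List String)) : List String :=
  let picked := pvDedupKeepOrder tags
  let parent_sets : PySem.Dict String (PySem.Set String) :=
    picked.foldl (fun d t => d.insert t (pvGetAllParents t parent_map)) PySem.Dict.empty
  let to_drop : PySem.Set String :=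
    picked.foldl (fun td a =>
      picked.foldl (fun td b =>
        if a = b then td
        else if a ∈ PySem.Dict.getD parent_sets b PySem.Set.empty then PySem.Set.add td a
        else td) td) PySem.Set.empty
  picked.filter (fun t => !(PySem.Set.contains to_drop t))

-- ===== PORT B =====

-- Source B iterates parent_map.items(): the Python dict has UNIQUE keys; under the convention
-- (assoc list, lookup = first match) its item list is the assoc list with later duplicate
-- keys removed — pvUniqueItems models exactly that
def pvUniqAux : List (String × List String) → PySem.Set String → List (String × List String)
  | [], _ => []
  | kv :: rest, seen =>
    if kv.1 ∈ seen then pvUniqAux rest seen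
    else kv :: pvUniqAux rest (PySem.Set.add seen kv.1)

def pvUniqueItems (pm : List (String × List String)) : List (String × List String) :=
  pvUniqAux pm PySem.Set.empty

-- Source B: for child, parents in parent_map.items(): for p in parents: children.setdefault(p, []).append(child)
def pvChildren (pm : List (String × List String)) : PySem.Dict String (List String) :=
  (pvUniqueItems pm).foldl (fun d kv =>
    kv.2.foldl (fun d p => d.modify p [] (· ++ [kv.1])) d) PySem.Dict.empty

-- children.get(x, [])
def pvCGet (pm : List (String × List String)) (x : String) : List String :=
  PySem.Dict.getD (pvChildren pm) x []

lemma pv_cget_mem (pm : List (String × List String)) (k x : String)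
    (hx : x ∈ pvCGet pm k) : x ∈ pvAllVals (pvChildren pm).items :=
  pv_getD_mem (pvChildren pm).items k x hx

lemma pv_cget_len (pm : List (String × List String)) (k : String) :
    (pvCGet pm k).length ≤ (pvAllVals (pvChildren pm).items).length :=
  pv_getD_len (pvChildren pm).items k

-- Source B's _is_ancestor_of_other while-loop (stack TOP FIRST, extend = reverse ++; the
-- proof argument only justifies termination):
--   while stack: x = stack.pop()
--     if x in picked_set and x != a: return True
--     if x not in seen: seen.add(x); stack.extend(children.get(x, []))
--   return False
def pvSearch (pm : List (String × List String)) (pickedSet : PySem.Set String) (a : String)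
    (seen : PySem.Set String) (stack : List String)
    (hstk : ∀ x ∈ stack, x ∈ pvAllVals (pvChildren pm).items) : Bool :=
  match stack with
  | [] => false
  | x :: rest =>
    if PySem.Set.contains pickedSet x && !(x == a) then true
    else if hx : x ∈ seen then
      pvSearch pm pickedSet a seen rest (fun y hy => hstk y (List.mem_cons_of_mem x hy))
    else
      pvSearch pm pickedSet a (PySem.Set.add seen x) ((pvCGet pm x).reverse ++ rest)
        (fun y hy => by
          rcases List.mem_append.mp hy with h | h
          · exact pv_cget_mem pm x y (List.mem_reverse.mp h)
          · exact hstk y (List.mem_cons_of_mem x h))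
  termination_by ((pvAllVals (pvChildren pm).items).dedup.filter (fun y => decide (y ∉ seen))).length * ((pvAllVals (pvChildren pm).items).length + 1) + stack.length
  decreasing_by
  · simp only [List.length_cons]
    omega
  · simp only [List.length_append, List.length_reverse, List.length_cons]
    exact pv_measure_dec _ _ _ _ _
      (pv_filter_decrease (pvAllVals (pvChildren pm).items) seen x (hstk x List.mem_cons_self) hx)
      (pv_cget_len pm x)

def resolve_overlap_py_alt (tags : List String) (parent_map : List (String × List String)) : List String :=
  let picked := PySem.List.dedup ((tags.map (fun x => PySem.Str.strip x)).filter (fun s => !(s == "")))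
  let pickedSet := PySem.Set.ofList picked
  picked.filter (fun t =>
    !(pvSearch parent_map pickedSet t PySem.Set.empty (pvCGet parent_map t).reverse
        (fun y hy => pv_cget_mem parent_map t y (List.mem_reverse.mp hy))))

-- ===== PRECONDITION & SPEC =====
def Spec_resolve_overlap_py (tags : List String) (parent_map : List (String × List String)) (out : List String) : Prop := out = resolve_overlap_py_alt tags parent_map
instance (tags : List String) (parent_map : List (String × List String)) (out : List String) : Decidable (Spec_resolve_overlap_py tags parent_map out) := by unfold Spec_resolve_overlap_py; infer_instance

-- ===== CLAIM (what is proved, stated in full; the proofs are below) =====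
def Claim_equal_resolve_overlap_py : Prop := ∀ (tags : List String) (parent_map : List (String × List String)), Dom_resolve_overlap_py tags parent_map → Spec_resolve_overlap_py tags parent_map (resolve_overlap_py tags parent_map)

-- ===== LEMMAS AND PROOFS =====

-- y is a direct parent of x (A's upward edge); Source B's child edge is its swap
def pvPar (pm : List (String × List String)) (x y : String) : Prop :=
  y ∈ PySem.Dict.getD ⟨pm⟩ x []

def pvChild (pm : List (String × List String)) (x y : String) : Prop :=
  y ∈ pvCGet pm x

lemma pv_closure_mono (pm : List (String × List String)) (out : PySem.Set String)
    (stack : List String) (hstk : ∀ x ∈ stack, x ∈ pvAllVals pm) (x : String)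
    (hx : x ∈ out ∨ x ∈ stack) : x ∈ pvClosureLoop pm out stack hstk := by
  fun_induction pvClosureLoop pm out stack hstk with
  | case1 out hstk =>
    simpa using hx
  | case2 out p rest hstk hp h2 ih =>
    apply ih
    rcases hx with h | h
    · exact Or.inl h
    · rcases List.mem_cons.mp h with rfl | h
      · exact Or.inl hp
      · exact Or.inr h
  | case3 out p rest hstk hp h2 ih =>
    apply ih
    rcases hx with h | h
    · exact Or.inl (by rw [PySem.Set.mem_add]; exact Or.inl h)
    · rcases List.mem_cons.mp h with rfl | h
      · exact Or.inl (by rw [PySem.Set.mem_add]; exact Or.inr rfl)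
      · exact Or.inr (List.mem_append.mpr (Or.inr h))

lemma pv_closure_closed (pm : List (String × List String)) (out : PySem.Set String)
    (stack : List String) (hstk : ∀ x ∈ stack, x ∈ pvAllVals pm)
    (hinv : ∀ u ∈ out, ∀ y, pvPar pm u y → y ∈ out ∨ y ∈ stack) :
    ∀ u ∈ pvClosureLoop pm out stack hstk, ∀ y, pvPar pm u y →
      y ∈ pvClosureLoop pm out stack hstk := by
  revert hinv
  fun_induction pvClosureLoop pm out stack hstk with
  | case1 out hstk =>
    intro hinv u hu y hy
    rcases hinv u hu y hy with h | h
    · exact h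
    · simp at h
  | case2 out p rest hstk hp h2 ih =>
    intro hinv
    apply ih
    intro u hu y hy
    rcases hinv u hu y hy with h | h
    · exact Or.inl h
    · rcases List.mem_cons.mp h with rfl | h
      · exact Or.inl hp
      · exact Or.inr h
  | case3 out p rest hstk hp h2 ih =>
    intro hinv
    apply ih
    intro u hu y hy
    rcases (PySem.Set.mem_add _ _ _).mp hu with hu' | rfl
    · rcases hinv u hu' y hy with h | h
      · exact Or.inl ((PySem.Set.mem_add _ _ _).mpr (Or.inl h))
      · rcases List.mem_cons.mp h with rfl | h
        · exact Or.inl ((PySem.Set.mem_add _ _ _).mpr (Or.inr rfl))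
        · exact Or.inr (List.mem_append.mpr (Or.inr h))
    · unfold pvPar at hy
      exact Or.inr (List.mem_append.mpr (Or.inl (List.mem_reverse.mpr hy)))

lemma pv_closure_sound (pm : List (String × List String)) (P : String → Prop)
    (hcl : ∀ p q, P p → pvPar pm p q → P q) (out : PySem.Set String)
    (stack : List String) (hstk : ∀ x ∈ stack, x ∈ pvAllVals pm)
    (hout : ∀ x ∈ out, P x) (hs : ∀ x ∈ stack, P x) :
    ∀ x ∈ pvClosureLoop pm out stack hstk, P x := by
  revert hout hs
  fun_induction pvClosureLoop pm out stack hstk with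
  | case1 out hstk =>
    intro hout hs x hx
    exact hout x hx
  | case2 out p rest hstk hp h2 ih =>
    intro hout hs
    exact ih hout (fun x hx => hs x (List.mem_cons_of_mem p hx))
  | case3 out p rest hstk hp h2 ih =>
    intro hout hs
    apply ih
    · intro x hx
      rcases (PySem.Set.mem_add _ _ _).mp hx with h | rfl
      · exact hout x h
      · exact hs x List.mem_cons_self
    · intro x hx
      rcases List.mem_append.mp hx with h | h
      · exact hcl p x (hs p List.mem_cons_self) (List.mem_reverse.mp h)
      · exact hs x (List.mem_cons_of_mem p h)

lemma pv_rtg_closed (R : String → String → Prop) (S : List String)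
    (hcl : ∀ u ∈ S, ∀ y, R u y → y ∈ S) :
    ∀ s x, s ∈ S → Relation.ReflTransGen R s x → x ∈ S := by
  intro s x hsm hr
  induction hr with
  | refl => exact hsm
  | tail _ e ih => exact hcl _ ih _ e

lemma pv_mem_parents (pm : List (String × List String)) (b x : String) :
    x ∈ pvParents b pm ↔ Relation.TransGen (pvPar pm) b x := by
  constructor
  · intro hx
    refine pv_closure_sound pm (fun z => Relation.TransGen (pvPar pm) b z) ?_ _ _ _ ?_ ?_ x hx
    · intro p q hp hpq
      exact hp.tail hpq
    · intro z hz
      simp [PySem.Set.empty] at hz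
    · intro z hz
      exact Relation.TransGen.single (List.mem_reverse.mp hz)
  · intro htg
    rcases Relation.TransGen.head'_iff.mp htg with ⟨c, hbc, hcx⟩
    have hc : c ∈ pvParents b pm :=
      pv_closure_mono _ _ _ _ c (Or.inr (List.mem_reverse.mpr hbc))
    exact pv_rtg_closed (pvPar pm) (pvParents b pm)
      (pv_closure_closed pm PySem.Set.empty _ _
        (by intro u hu; simp [PySem.Set.empty] at hu)) c x hc hcx

-- dict-iteration model: an entry of pvUniqueItems is exactly a first-match get? hit
lemma pv_uniq_val_aux (l : List (String × List String)) (seen : PySem.Set String)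
    (k : String) (ps : List String) (h : (k, ps) ∈ pvUniqAux l seen) :
    k ∉ seen ∧ PySem.Dict.get? (⟨l⟩ : PySem.Dict String (List String)) k = some ps := by
  induction l generalizing seen with
  | nil => simp [pvUniqAux] at h
  | cons kv rest ih =>
    rw [show (⟨kv :: rest⟩ : PySem.Dict String (List String)) = ⟨(kv.1, kv.2) :: rest⟩ from by simp]
    rw [PySem.Dict.get?_mk_cons]
    unfold pvUniqAux at h
    by_cases hs : kv.1 ∈ seen
    · rw [if_pos hs] at h
      obtain ⟨hk, hg⟩ := ih seen h
      have hne : (kv.1 == k) = false := by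
        simp only [beq_eq_false_iff_ne, ne_eq]
        intro heq
        exact hk (heq ▸ hs)
      rw [hne]
      exact ⟨hk, by simpa using hg⟩
    · rw [if_neg hs] at h
      rcases List.mem_cons.mp h with heq | hmem
      · have h1 : kv.1 = k := by rw [← heq]
        have h2 : kv.2 = ps := by rw [← heq]
        refine ⟨h1 ▸ hs, ?_⟩
        simp [h1, h2]
      · obtain ⟨hk, hg⟩ := ih _ hmem
        rw [PySem.Set.mem_add _ _ _] at hk
        simp only [not_or] at hk
        have hne : (kv.1 == k) = false := by
          simp only [beq_eq_false_iff_ne, ne_eq]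
          exact fun heq => hk.2 heq.symm
        rw [hne]
        exact ⟨hk.1, by simpa using hg⟩

lemma pv_uniq_val (pm : List (String × List String)) (k : String) (ps : List String)
    (h : (k, ps) ∈ pvUniqueItems pm) :
    PySem.Dict.get? (⟨pm⟩ : PySem.Dict String (List String)) k = some ps :=
  (pv_uniq_val_aux pm PySem.Set.empty k ps h).2

lemma pv_uniq_mem_aux (l : List (String × List String)) (seen : PySem.Set String)
    (k : String) (ps : List String)
    (h : PySem.Dict.get? (⟨l⟩ : PySem.Dict String (List String)) k = some ps)
    (hk : k ∉ seen) : (k, ps) ∈ pvUniqAux l seen := by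
  induction l generalizing seen with
  | nil => simp [PySem.Dict.get?] at h
  | cons kv rest ih =>
    rw [show (⟨kv :: rest⟩ : PySem.Dict String (List String)) = ⟨(kv.1, kv.2) :: rest⟩ from by simp] at h
    rw [PySem.Dict.get?_mk_cons] at h
    unfold pvUniqAux
    by_cases hb : (kv.1 == k) = true
    · have h1 : kv.1 = k := by simpa using hb
      rw [if_pos hb] at h
      have h2 : kv.2 = ps := by simpa using h
      rw [if_neg (h1 ▸ hk)]
      exact List.mem_cons.mpr (Or.inl (by rw [← h1, ← h2]))
    · rw [if_neg hb] at h
      by_cases hs : kv.1 ∈ seen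
      · rw [if_pos hs]
        exact ih seen h hk
      · rw [if_neg hs]
        refine List.mem_cons_of_mem _ (ih _ h ?_)
        rw [PySem.Set.mem_add _ _ _]
        simp only [not_or]
        exact ⟨hk, fun heq => hb (by simp [heq])⟩

lemma pv_uniq_mem (pm : List (String × List String)) (k : String) (ps : List String)
    (h : PySem.Dict.get? (⟨pm⟩ : PySem.Dict String (List String)) k = some ps) :
    (k, ps) ∈ pvUniqueItems pm :=
  pv_uniq_mem_aux pm PySem.Set.empty k ps h (by simp [PySem.Set.empty])

lemma pv_children_inner (k : String) (ps : List String)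
    (d : PySem.Dict String (List String)) (x y : String) :
    (y ∈ PySem.Dict.getD (ps.foldl (fun d p => d.modify p [] (· ++ [k])) d) x []) ↔
      y ∈ PySem.Dict.getD d x [] ∨ (y = k ∧ x ∈ ps) := by
  have h := PySem.Dict.getD_foldl_modify_append (ps.map (fun p => (p, k))) d x
  rw [List.foldl_map] at h
  rw [h]
  simp only [List.mem_append]
  constructor
  · rintro (hy | hy)
    · exact Or.inl hy
    · right
      obtain ⟨q, hq, rfl⟩ := List.mem_map.mp hy
      obtain ⟨hq1, hq2⟩ := List.mem_filter.mp hq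
      obtain ⟨a, ha, rfl⟩ := List.mem_map.mp hq1
      exact ⟨rfl, by rwa [show a = x from by simpa using hq2] at ha⟩
  · rintro (hy | ⟨rfl, hx⟩)
    · exact Or.inl hy
    · right
      exact List.mem_map.mpr ⟨(x, y),
        List.mem_filter.mpr ⟨List.mem_map.mpr ⟨x, hx, rfl⟩, by simp⟩, rfl⟩

lemma pv_children_outer (items : List (String × List String))
    (d : PySem.Dict String (List String)) (x y : String) :
    (y ∈ PySem.Dict.getD (items.foldl (fun d kv =>
        kv.2.foldl (fun d p => d.modify p [] (· ++ [kv.1])) d) d) x []) ↔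
      y ∈ PySem.Dict.getD d x [] ∨ ∃ kv ∈ items, y = kv.1 ∧ x ∈ kv.2 := by
  induction items generalizing d with
  | nil => simp
  | cons kv tl ih =>
    simp only [List.foldl_cons]
    rw [ih, pv_children_inner]
    simp only [List.mem_cons]
    constructor
    · rintro ((hy | ⟨rfl, hx⟩) | ⟨kv', hkv', hyx⟩)
      · exact Or.inl hy
      · exact Or.inr ⟨kv, Or.inl rfl, rfl, hx⟩
      · exact Or.inr ⟨kv', Or.inr hkv', hyx⟩
    · rintro (hy | ⟨kv', hkv', hyx⟩)
      · exact Or.inl (Or.inl hy)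
      · rcases hkv' with rfl | hkv'
        · exact Or.inl (Or.inr ⟨hyx.1, hyx.2⟩)
        · exact Or.inr ⟨kv', hkv', hyx⟩

lemma pv_mem_cget (pm : List (String × List String)) (x y : String) :
    y ∈ pvCGet pm x ↔ pvPar pm y x := by
  unfold pvCGet pvChildren pvPar
  rw [pv_children_outer]
  rw [PySem.Dict.getD_empty]
  simp only [List.not_mem_nil, false_or]
  constructor
  · rintro ⟨kv, hmem, heq, hx⟩
    have hval := pv_uniq_val pm kv.1 kv.2 (by simpa using hmem)
    rw [PySem.Dict.getD_eq_get?_getD, heq, hval]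
    exact hx
  · intro hx
    cases hq : PySem.Dict.get? (⟨pm⟩ : PySem.Dict String (List String)) y with
    | none =>
      rw [PySem.Dict.getD_eq_get?_getD, hq] at hx
      simp at hx
    | some ps =>
      refine ⟨(y, ps), pv_uniq_mem pm y ps hq, rfl, ?_⟩
      rw [PySem.Dict.getD_eq_get?_getD, hq] at hx
      exact hx

lemma pv_transGen_flip (pm : List (String × List String)) (a b : String) :
    Relation.TransGen (pvChild pm) a b ↔ Relation.TransGen (pvPar pm) b a := by
  constructor
  · intro h
    exact Relation.transGen_swap.mp
      (Relation.TransGen.mono (fun x y hxy => (pv_mem_cget pm x y).mp hxy) h)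
  · intro h
    exact Relation.TransGen.mono (fun x y hxy => (pv_mem_cget pm x y).mpr hxy)
      (Relation.transGen_swap.mpr h)

lemma pv_search_escape (pm : List (String × List String)) (pickedSet : PySem.Set String)
    (a : String) (seen : PySem.Set String) (stack : List String)
    (hinv : ∀ u ∈ seen, ¬(PySem.Set.contains pickedSet u && !(u == a)) = true ∧
      ∀ y, pvChild pm u y → y ∈ seen ∨ y ∈ stack)
    (p t : String) (hp : p ∈ seen) (hrtg : Relation.ReflTransGen (pvChild pm) p t)
    (ht : (PySem.Set.contains pickedSet t && !(t == a)) = true) :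
    ∃ s ∈ stack, Relation.ReflTransGen (pvChild pm) s t := by
  revert hp
  induction hrtg using Relation.ReflTransGen.head_induction_on with
  | refl => intro hpt; exact absurd ht (hinv t hpt).1
  | head h' hct ih =>
    intro hp
    rcases (hinv _ hp).2 _ h' with hseen | hstack
    · exact ih hseen
    · exact ⟨_, hstack, hct⟩

lemma pv_search_correct (pm : List (String × List String)) (pickedSet : PySem.Set String)
    (a : String) (seen : PySem.Set String) (stack : List String)
    (hstk : ∀ x ∈ stack, x ∈ pvAllVals (pvChildren pm).items)
    (hinv : ∀ u ∈ seen, ¬(PySem.Set.contains pickedSet u && !(u == a)) = true ∧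
      ∀ y, pvChild pm u y → y ∈ seen ∨ y ∈ stack) :
    (pvSearch pm pickedSet a seen stack hstk = true ↔
      ∃ s ∈ stack, ∃ t, Relation.ReflTransGen (pvChild pm) s t ∧
        (PySem.Set.contains pickedSet t && !(t == a)) = true) := by
  revert hinv
  fun_induction pvSearch pm pickedSet a seen stack hstk with
  | case1 seen hstk =>
    intro hinv
    simp
  | case2 seen x rest hstk hcond =>
    intro hinv
    simp only [true_iff]
    exact ⟨x, List.mem_cons_self, x, Relation.ReflTransGen.refl, hcond⟩
  | case3 seen x rest hstk hcond hx h2 ih =>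
    intro hinv
    have hinv' : ∀ u ∈ seen, ¬(PySem.Set.contains pickedSet u && !(u == a)) = true ∧
        ∀ y, pvChild pm u y → y ∈ seen ∨ y ∈ rest := by
      intro u hu
      refine ⟨(hinv u hu).1, fun y hy => ?_⟩
      rcases (hinv u hu).2 y hy with h | h
      · exact Or.inl h
      · rcases List.mem_cons.mp h with rfl | h
        · exact Or.inl hx
        · exact Or.inr h
    rw [ih hinv']
    constructor
    · rintro ⟨s, hs, t, hst, htt⟩
      exact ⟨s, List.mem_cons_of_mem x hs, t, hst, htt⟩
    · rintro ⟨s, hs, t, hst, htt⟩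
      rcases List.mem_cons.mp hs with rfl | hs'
      · obtain ⟨s', hs', hst'⟩ := pv_search_escape pm pickedSet a seen rest hinv' s t hx hst htt
        exact ⟨s', hs', t, hst', htt⟩
      · exact ⟨s, hs', t, hst, htt⟩
  | case4 seen x rest hstk hcond hx h2 ih =>
    intro hinv
    have hinv' : ∀ u ∈ PySem.Set.add seen x,
        ¬(PySem.Set.contains pickedSet u && !(u == a)) = true ∧
        ∀ y, pvChild pm u y → y ∈ PySem.Set.add seen x ∨ y ∈ (pvCGet pm x).reverse ++ rest := by
      intro u hu
      rcases (PySem.Set.mem_add _ _ _).mp hu with hu' | rfl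
      · refine ⟨(hinv u hu').1, fun y hy => ?_⟩
        rcases (hinv u hu').2 y hy with h | h
        · exact Or.inl ((PySem.Set.mem_add _ _ _).mpr (Or.inl h))
        · rcases List.mem_cons.mp h with rfl | h
          · exact Or.inl ((PySem.Set.mem_add _ _ _).mpr (Or.inr rfl))
          · exact Or.inr (List.mem_append.mpr (Or.inr h))
      · refine ⟨hcond, fun y hy => ?_⟩
        unfold pvChild at hy
        exact Or.inr (List.mem_append.mpr (Or.inl (List.mem_reverse.mpr hy)))
    rw [ih hinv']
    constructor
    · rintro ⟨s, hs, t, hst, htt⟩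
      rcases List.mem_append.mp hs with h | h
      · exact ⟨x, List.mem_cons_self, t,
          Relation.ReflTransGen.head (List.mem_reverse.mp h) hst, htt⟩
      · exact ⟨s, List.mem_cons_of_mem x h, t, hst, htt⟩
    · rintro ⟨s, hs, t, hst, htt⟩
      rcases List.mem_cons.mp hs with rfl | hs'
      · rcases Relation.ReflTransGen.cases_head hst with rfl | ⟨c, hsc, hct⟩
        · exact absurd htt hcond
        · exact ⟨c, List.mem_append.mpr (Or.inl (List.mem_reverse.mpr hsc)), t, hct, htt⟩
      · exact ⟨s, List.mem_append.mpr (Or.inr hs'), t, hst, htt⟩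

lemma pv_reaches_iff (pm : List (String × List String)) (pickedSet : PySem.Set String)
    (a : String) :
    (pvSearch pm pickedSet a PySem.Set.empty (pvCGet pm a).reverse
        (fun y hy => pv_cget_mem pm a y (List.mem_reverse.mp hy)) = true ↔
      ∃ t, Relation.TransGen (pvPar pm) t a ∧
        (PySem.Set.contains pickedSet t && !(t == a)) = true) := by
  rw [pv_search_correct pm pickedSet a PySem.Set.empty _ _
    (by intro u hu; simp [PySem.Set.empty] at hu)]
  constructor
  · rintro ⟨s, hs, t, hst, htt⟩
    have h1 : Relation.TransGen (pvChild pm) a t :=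
      Relation.TransGen.head'_iff.mpr ⟨s, List.mem_reverse.mp hs, hst⟩
    exact ⟨t, (pv_transGen_flip pm a t).mp h1, htt⟩
  · rintro ⟨t, htg, htt⟩
    have h1 : Relation.TransGen (pvChild pm) a t := (pv_transGen_flip pm a t).mpr htg
    rcases Relation.TransGen.head'_iff.mp h1 with ⟨c, hac, hct⟩
    exact ⟨c, List.mem_reverse.mpr hac, t, hct, htt⟩

-- reused A-side characterisations
lemma pv_dropWhile_idem (p : Char → Bool) (l : List Char) :
    (l.dropWhile p).dropWhile p = l.dropWhile p := by
  cases h : l.dropWhile p with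
  | nil => simp
  | cons a t =>
    have hne : l.dropWhile p ≠ [] := by simp [h]
    have ha := List.head_dropWhile_not p hne
    rw [show (l.dropWhile p).head hne = a from by simp [h]] at ha
    simp [List.dropWhile, ha]

lemma pv_rstrip_prefix (l : List Char) : PySem.Chars.rstrip l <+: l := by
  unfold PySem.Chars.rstrip
  exact List.reverse_suffix.mp (by rw [List.reverse_reverse]; exact List.dropWhile_suffix _)

lemma pv_rstrip_idem (l : List Char) :
    PySem.Chars.rstrip (PySem.Chars.rstrip l) = PySem.Chars.rstrip l := by
  unfold PySem.Chars.rstrip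
  rw [List.reverse_reverse, pv_dropWhile_idem]

lemma pv_lstrip_rstrip_lstrip (l : List Char) :
    PySem.Chars.lstrip (PySem.Chars.rstrip (PySem.Chars.lstrip l)) =
      PySem.Chars.rstrip (PySem.Chars.lstrip l) := by
  cases h : PySem.Chars.rstrip (PySem.Chars.lstrip l) with
  | nil => simp [PySem.Chars.lstrip]
  | cons a t =>
    have hpre : PySem.Chars.rstrip (PySem.Chars.lstrip l) <+: PySem.Chars.lstrip l :=
      pv_rstrip_prefix _
    rw [h] at hpre
    obtain ⟨r, hr⟩ := hpre
    have hll : l.dropWhile PySem.Chars.isspace = a :: (t ++ r) := by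
      have : PySem.Chars.lstrip l = a :: (t ++ r) := by rw [← hr]; simp
      simpa [PySem.Chars.lstrip] using this
    have hne : l.dropWhile PySem.Chars.isspace ≠ [] := by simp [hll]
    have ha := List.head_dropWhile_not PySem.Chars.isspace hne
    rw [show (l.dropWhile PySem.Chars.isspace).head hne = a from by simp [hll]] at ha
    simp [PySem.Chars.lstrip, List.dropWhile, ha]

lemma pv_strip_idem_chars (l : List Char) :
    PySem.Chars.strip (PySem.Chars.strip l) = PySem.Chars.strip l := by
  unfold PySem.Chars.strip
  rw [pv_lstrip_rstrip_lstrip, pv_rstrip_idem]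

lemma pv_strip_idem (s : String) :
    PySem.Str.strip (PySem.Str.strip s) = PySem.Str.strip s := by
  apply String.toList_inj.mp
  simp [pv_strip_idem_chars]

lemma pv_dedup_fold (xs : List String) (l : PySem.Set String) :
    xs.foldl pvDedupStep (l, l) =
      (PySem.Set.update l ((xs.map (fun x => PySem.Str.strip x)).filter (fun s => !(s == ""))),
       PySem.Set.update l ((xs.map (fun x => PySem.Str.strip x)).filter (fun s => !(s == "")))) := by
  induction xs generalizing l with
  | nil => simp [PySem.Set.update_nil]
  | cons x xs ih =>
    simp only [List.foldl_cons, List.map_cons, List.filter_cons]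
    by_cases h0 : PySem.Str.strip x = ""
    · have hstep : pvDedupStep (l, l) x = (l, l) := by
        simp [pvDedupStep, h0]
      rw [hstep, ih, if_neg (by simp [h0])]
    · by_cases h1 : PySem.Str.strip x ∈ l
      · have hstep : pvDedupStep (l, l) x = (l, l) := by
          simp [pvDedupStep, h1]
        rw [hstep, ih, if_pos (by simp [h0])]
        rw [PySem.Set.update_cons, PySem.Set.add_of_mem h1]
      · have hstep : pvDedupStep (l, l) x =
            (PySem.Set.add l (PySem.Str.strip x), PySem.Set.add l (PySem.Str.strip x)) := by
          simp [pvDedupStep, h0, h1]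
        rw [hstep, ih, if_pos (by simp [h0])]
        rw [PySem.Set.update_cons]

lemma pv_dedup_eq (xs : List String) :
    pvDedupKeepOrder xs =
      PySem.List.dedup ((xs.map (fun x => PySem.Str.strip x)).filter (fun s => !(s == ""))) := by
  unfold pvDedupKeepOrder
  rw [show (PySem.Set.empty (α := String), ([] : List String)) =
        ((PySem.Set.empty : PySem.Set String), (PySem.Set.empty : PySem.Set String)) from rfl]
  rw [pv_dedup_fold]
  rw [PySem.Set.update_empty]
  rfl

lemma pv_parent_sets_getD (L : List String) (pm : List (String × List String))
    (hnd : L.Nodup) (b : String) (hb : b ∈ L) (d0 : PySem.Set String) :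
    PySem.Dict.getD (L.foldl (fun d t => d.insert t (pvGetAllParents t pm)) PySem.Dict.empty) b
      d0 = pvGetAllParents b pm := by
  have hitems := PySem.Dict.items_foldl_insert_fresh (l := L) (k := fun t => t)
      (v := fun t => pvGetAllParents t pm) (d := PySem.Dict.empty)
      (fun a _ => PySem.Dict.contains_empty a) (by simpa using hnd)
  have hkeys : (L.foldl (fun d t => d.insert t (pvGetAllParents t pm)) PySem.Dict.empty).keys.Nodup :=
    PySem.Dict.nodup_keys_foldl_insert L (fun _ t => pvGetAllParents t pm) PySem.Dict.empty
      PySem.Dict.nodup_keys_empty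
  have hmem : (b, pvGetAllParents b pm) ∈
      (L.foldl (fun d t => d.insert t (pvGetAllParents t pm)) PySem.Dict.empty).items := by
    rw [hitems]
    simp only [List.mem_append, List.mem_map]
    exact Or.inr ⟨b, hb, rfl⟩
  exact PySem.Dict.getD_of_mem_items _ hmem hkeys _

lemma pv_mem_inner (a : String) (g : String → PySem.Set String) :
    ∀ (L : List String) (td : PySem.Set String) (x : String),
      (x ∈ L.foldl (fun td b =>
          if a = b then td
          else if a ∈ g b then PySem.Set.add td a
          else td) td) ↔ x ∈ td ∨ (x = a ∧ ∃ b ∈ L, a ≠ b ∧ a ∈ g b) := by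
  intro L
  induction L with
  | nil => simp
  | cons c L ih =>
    intro td x
    simp only [List.foldl_cons]
    by_cases h1 : a = c
    · rw [if_pos h1, ih]
      simp [← h1]
    · rw [if_neg h1]
      by_cases h2 : a ∈ g c
      · rw [if_pos h2, ih]
        simp [PySem.Set.mem_add, h1, h2]
        tauto
      · rw [if_neg h2, ih]
        simp [h2]

lemma pv_mem_outer (g : String → PySem.Set String) (P : List String) :
    ∀ (L : List String) (td : PySem.Set String) (x : String),
      (x ∈ L.foldl (fun td a =>
          P.foldl (fun td b =>
            if a = b then td
            else if a ∈ g b then PySem.Set.add td a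
            else td) td) td) ↔
        x ∈ td ∨ ∃ a ∈ L, x = a ∧ ∃ b ∈ P, a ≠ b ∧ a ∈ g b := by
  intro L
  induction L with
  | nil => simp
  | cons c L ih =>
    intro td x
    simp only [List.foldl_cons]
    rw [ih, pv_mem_inner]
    constructor
    · rintro (h | ⟨a, haL, rfl, hQ⟩)
      · rcases h with h | ⟨rfl, hQ⟩
        · exact Or.inl h
        · exact Or.inr ⟨x, List.mem_cons_self, rfl, hQ⟩
      · exact Or.inr ⟨x, List.mem_cons_of_mem c haL, rfl, hQ⟩
    · rintro (h | ⟨a, haC, rfl, hQ⟩)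
      · exact Or.inl (Or.inl h)
      · rcases List.mem_cons.mp haC with rfl | haL
        · exact Or.inl (Or.inr ⟨rfl, hQ⟩)
        · exact Or.inr ⟨x, haL, rfl, hQ⟩

lemma pv_picked_fix (tags : List String) (t : String)
    (ht : t ∈ PySem.List.dedup ((tags.map (fun x => PySem.Str.strip x)).filter (fun s => !(s == "")))) :
    PySem.Str.strip t = t ∧ t ≠ "" := by
  have h := PySem.Set.mem_ofList _ t |>.mp ht
  simp only [List.mem_filter, List.mem_map] at h
  obtain ⟨⟨x, -, rfl⟩, hne⟩ := h
  refine ⟨pv_strip_idem x, ?_⟩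
  simpa using hne

lemma pv_main (tags : List String) (pm : List (String × List String)) :
    resolve_overlap_py tags pm = resolve_overlap_py_alt tags pm := by
  unfold resolve_overlap_py resolve_overlap_py_alt
  rw [pv_dedup_eq]
  set picked := PySem.List.dedup ((tags.map (fun x => PySem.Str.strip x)).filter (fun s => !(s == ""))) with hpicked
  have hnd : picked.Nodup := PySem.Set.nodup_ofList _
  apply List.filter_congr
  intro t ht
  have hA : (t ∈ picked.foldl (fun td a =>
      picked.foldl (fun td b =>
        if a = b then td
        else if a ∈ PySem.Dict.getD
            (picked.foldl (fun d t => d.insert t (pvGetAllParents t pm)) PySem.Dict.empty)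
            b PySem.Set.empty then PySem.Set.add td a
        else td) td) PySem.Set.empty) ↔
      ∃ b ∈ picked, t ≠ b ∧ Relation.TransGen (pvPar pm) b t := by
    rw [pv_mem_outer]
    constructor
    · rintro (h | ⟨a', ha', rfl, b, hb, hne, hmem⟩)
      · simp [PySem.Set.empty] at h
      · rw [pv_parent_sets_getD picked pm hnd b hb _] at hmem
        obtain ⟨hfix, hne0⟩ := pv_picked_fix tags b hb
        rw [show pvGetAllParents b pm = pvParents b pm from by
          simp [pvGetAllParents, hfix, hne0]] at hmem
        exact ⟨b, hb, hne, (pv_mem_parents pm b _).mp hmem⟩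
    · rintro ⟨b, hb, hne, htg⟩
      refine Or.inr ⟨t, ht, rfl, b, hb, hne, ?_⟩
      rw [pv_parent_sets_getD picked pm hnd b hb _]
      obtain ⟨hfix, hne0⟩ := pv_picked_fix tags b hb
      rw [show pvGetAllParents b pm = pvParents b pm from by
        simp [pvGetAllParents, hfix, hne0]]
      exact (pv_mem_parents pm b t).mpr htg
  have hB : (pvSearch pm (PySem.Set.ofList picked) t PySem.Set.empty (pvCGet pm t).reverse
        (fun y hy => pv_cget_mem pm t y (List.mem_reverse.mp hy)) = true) ↔
      ∃ b ∈ picked, t ≠ b ∧ Relation.TransGen (pvPar pm) b t := by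
    rw [pv_reaches_iff]
    constructor
    · rintro ⟨b, htg, hcond⟩
      rw [Bool.and_eq_true] at hcond
      have hmem : b ∈ picked := (PySem.Set.mem_ofList _ _).mp
        ((PySem.Set.contains_iff _ _).mp hcond.1)
      have hbt : b ≠ t := by simpa using hcond.2
      exact ⟨b, hmem, hbt.symm, htg⟩
    · rintro ⟨b, hb, hne, htg⟩
      refine ⟨b, htg, ?_⟩
      rw [Bool.and_eq_true]
      refine ⟨(PySem.Set.contains_iff _ _).mpr ((PySem.Set.mem_ofList _ _).mpr hb), ?_⟩
      simpa using hne.symm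
  have hc : PySem.Set.contains (picked.foldl (fun td a =>
      picked.foldl (fun td b =>
        if a = b then td
        else if a ∈ PySem.Dict.getD
            (picked.foldl (fun d t => d.insert t (pvGetAllParents t pm)) PySem.Dict.empty)
            b PySem.Set.empty then PySem.Set.add td a
        else td) td) PySem.Set.empty) t =
      pvSearch pm (PySem.Set.ofList picked) t PySem.Set.empty (pvCGet pm t).reverse
        (fun y hy => pv_cget_mem pm t y (List.mem_reverse.mp hy)) := by
    rw [Bool.eq_iff_iff, PySem.Set.contains_iff, hA, hB]
  rw [hc]

-- ===== VERDICT (by name: the statement is the Claim_ definition above) =====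
theorem resolve_overlap_py_spec : Claim_equal_resolve_overlap_py := by
  intro tags pm _
  unfold Spec_resolve_overlap_py
  exact pv_main tags pm
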